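-- pv_equiv track=rewrite | github.com/inQuitiVe/Full-Stack-Accelerator-Optimization | eda_server_scripts/eda_server.py | _format_params_for_log
-- ===== SOURCE A (Python) =====
-- from typing import Any, Dict, Optional
--
-- PARAMS_HARDWARE = frozenset({
--     "hd_dim", "reram_size", "inner_dim", "frequency",
--     "encoder_x_dim", "encoder_y_dim",
--     "cnn_x_dim_1", "cnn_y_dim_1", "cnn_x_dim_2", "cnn_y_dim_2",
--     "out_channels_1", "out_channels_2",
-- })
--
-- PARAMS_SOFTWARE = frozenset({
--     "kernel_size_1", "kernel_size_2",
--     "stride_1", "stride_2", "padding_1", "padding_2", "dilation_1", "dilation_2",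
-- })
--
-- PARAMS_SYNTH_FLOW = frozenset({
--     "synth_mode", "top_module",
--     "syn_map_effort", "syn_opt_effort",
--     "enable_clock_gating", "max_area_ignore_tns", "enable_retime",
--     "compile_timing_high_effort", "compile_area_high_effort", "compile_ultra_gate_clock",
--     "compile_exact_map", "compile_no_autoungroup", "compile_clock_gating_through_hierarchy",
--     "enable_leakage_optimization", "enable_dynamic_optimization", "enable_enhanced_resource_sharing",
--     "dp_smartgen_strategy",
-- })
--
-- def _format_params_for_log(params: Dict[str, Any]) -> str:
--     """Format params into categorized multi-line log for readability."""
--     hw = {k: v for k, v in params.items() if k in PARAMS_HARDWARE}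
--     sw = {k: v for k, v in params.items() if k in PARAMS_SOFTWARE}
--     flow = {k: v for k, v in params.items() if k in PARAMS_SYNTH_FLOW}
--     other = {k: v for k, v in params.items()
--              if k not in PARAMS_HARDWARE and k not in PARAMS_SOFTWARE and k not in PARAMS_SYNTH_FLOW}
--
--     def _fmt_section(title: str, items: dict) -> str:
--         if not items:
--             return ""
--         pairs = [f"{k}={v}" for k, v in sorted(items.items())]
--         # Wrap at ~100 chars, join with ", " for readability
--         lines, buf = [], []
--         for p in pairs:
--             if buf and sum(len(x) for x in buf) + len(buf) * 2 + len(p) > 100: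
--                 lines.append("    " + ", ".join(buf))
--                 buf = []
--             buf.append(p)
--         if buf:
--             lines.append("    " + ", ".join(buf))
--         return f"  {title}\n" + "\n".join(lines)
--
--     parts = []
--     if hw:
--         parts.append(_fmt_section("Hardware:", hw))
--     if sw:
--         parts.append(_fmt_section("Software:", sw))
--     if flow:
--         parts.append(_fmt_section("Synth/Flow:", flow))
--     if other:
--         parts.append(_fmt_section("Other:", other))
--     return "\n".join(p for p in parts if p) or "(empty)"
-- ===== SOURCE B (Python) =====
-- # B: one table-driven categorization + a single global sort of (cat, k, v) triples,
-- # then a flat emitter that peels sections off the front as runs of equal category and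
-- # each wrapped line as the maximal prefix fitting in 100 chars (A: four dict
-- # comprehensions, four separately sorted buckets, and a buffer-list fold per section).
-- PARAMS_HARDWARE = frozenset({
--     "hd_dim", "reram_size", "inner_dim", "frequency",
--     "encoder_x_dim", "encoder_y_dim",
--     "cnn_x_dim_1", "cnn_y_dim_1", "cnn_x_dim_2", "cnn_y_dim_2",
--     "out_channels_1", "out_channels_2",
-- })
--
-- PARAMS_SOFTWARE = frozenset({
--     "kernel_size_1", "kernel_size_2",
--     "stride_1", "stride_2", "padding_1", "padding_2", "dilation_1", "dilation_2",
-- })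
--
-- PARAMS_SYNTH_FLOW = frozenset({
--     "synth_mode", "top_module",
--     "syn_map_effort", "syn_opt_effort",
--     "enable_clock_gating", "max_area_ignore_tns", "enable_retime",
--     "compile_timing_high_effort", "compile_area_high_effort", "compile_ultra_gate_clock",
--     "compile_exact_map", "compile_no_autoungroup", "compile_clock_gating_through_hierarchy",
--     "enable_leakage_optimization", "enable_dynamic_optimization", "enable_enhanced_resource_sharing",
--     "dp_smartgen_strategy",
-- })
--
-- _CATS = (PARAMS_HARDWARE, PARAMS_SOFTWARE, PARAMS_SYNTH_FLOW)
-- _TITLES = ("  Hardware:", "  Software:", "  Synth/Flow:", "  Other:")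
--
--
-- def _cat(k):
--     for i, s in enumerate(_CATS):
--         if k in s:
--             return i
--     return 3
--
--
-- def _wrap(pairs):
--     # pairs is a list of "k=v" strings; each emitted line is the maximal prefix
--     # that fits in 100 chars (always at least one pair), peeled off the front.
--     lines = []
--     while pairs:
--         width = len(pairs[0])
--         i = 1
--         while i < len(pairs) and width + 2 + len(pairs[i]) <= 100:
--             width += 2 + len(pairs[i])
--             i += 1
--         lines.append("    " + ", ".join(pairs[:i]))
--         pairs = pairs[i:]
--     return lines
--
--
-- def _sections(tagged):
--     # tagged is sorted by (category, key); peel off one category run per step.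
--     out = []
--     while tagged:
--         c = tagged[0][0]
--         i = 1
--         while i < len(tagged) and tagged[i][0] == c:
--             i += 1
--         out.append(_TITLES[c])
--         out.extend(_wrap([f"{k}={v}" for _, k, v in tagged[:i]]))
--         tagged = tagged[i:]
--     return out
--
--
-- def _format_params_for_log(params):
--     tagged = sorted(((_cat(k), k, v) for k, v in params.items()),
--                     key=lambda t: (t[0], t[1]))
--     return "\n".join(_sections(tagged)) or "(empty)"
-- ===== Notes on version B (the rewrite author's own statement) =====
-- stated objective: alternative
-- what changed: A builds four bucket dicts with four separate comprehensions, sorts and wraps each bucket inside a helper using a buffer list whose length sum is recomputed per item; B instead tags every item with a category index from one lookup pass, performs a single global sort by (category, key), and emits the flat line list by peeling one category run and one maximal-width line (at most 100 chars) off the front per step.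
import Mathlib
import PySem

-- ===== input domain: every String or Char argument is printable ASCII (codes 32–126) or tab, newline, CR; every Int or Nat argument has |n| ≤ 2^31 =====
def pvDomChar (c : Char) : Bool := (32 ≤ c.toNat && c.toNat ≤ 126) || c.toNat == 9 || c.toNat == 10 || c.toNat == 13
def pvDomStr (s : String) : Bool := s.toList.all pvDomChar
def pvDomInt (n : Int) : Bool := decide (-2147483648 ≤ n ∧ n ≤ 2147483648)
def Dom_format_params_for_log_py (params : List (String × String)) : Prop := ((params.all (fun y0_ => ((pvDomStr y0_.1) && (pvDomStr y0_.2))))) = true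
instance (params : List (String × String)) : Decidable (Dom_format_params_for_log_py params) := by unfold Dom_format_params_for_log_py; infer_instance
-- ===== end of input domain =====

-- ===== PORT A =====
-- B re-implements A with one table-driven categorization, a single global sort of
-- (category, key, value) triples and a flat run-peeling emitter; same output ('alternative').
-- The three category key sets (frozensets in the Python; used only for membership tests).
def pvHW : List String := ["hd_dim", "reram_size", "inner_dim", "frequency",
  "encoder_x_dim", "encoder_y_dim", "cnn_x_dim_1", "cnn_y_dim_1", "cnn_x_dim_2", "cnn_y_dim_2",
  "out_channels_1", "out_channels_2"]
def pvSW : List String := ["kernel_size_1", "kernel_size_2",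
  "stride_1", "stride_2", "padding_1", "padding_2", "dilation_1", "dilation_2"]
def pvFL : List String := ["synth_mode", "top_module", "syn_map_effort", "syn_opt_effort",
  "enable_clock_gating", "max_area_ignore_tns", "enable_retime",
  "compile_timing_high_effort", "compile_area_high_effort", "compile_ultra_gate_clock",
  "compile_exact_map", "compile_no_autoungroup", "compile_clock_gating_through_hierarchy",
  "enable_leakage_optimization", "enable_dynamic_optimization", "enable_enhanced_resource_sharing",
  "dp_smartgen_strategy"]

-- A's wrap-loop body: flush the buffer LIST when sum(len(x) for x in buf) + len(buf)*2 + len(p) > 100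
def pvStepA (st : List String × List String) (p : String) : List String × List String :=
  if st.2 ≠ [] ∧ (st.2.map PySem.Str.len).sum + (st.2.length : Int) * 2 + PySem.Str.len p > 100 then
    (st.1 ++ ["    " ++ PySem.Str.join ", " st.2], [p])
  else (st.1, st.2 ++ [p])

-- A's _fmt_section: '' on an empty dict, else sort the items and wrap with the buffer list
def pvFmtSectionA (title : String) (items : List (String × String)) : String :=
  if items = [] then ""
  else
    let pairs := (PySem.List.sorted2 items Prod.fst Prod.snd).map (fun kv => kv.1 ++ "=" ++ kv.2)
    let st := pairs.foldl pvStepA ([], [])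
    let lines := if st.2 ≠ [] then st.1 ++ ["    " ++ PySem.Str.join ", " st.2] else st.1
    "  " ++ title ++ "\n" ++ PySem.Str.join "\n" lines

-- the parameter is a Python dict: PySem.Dict.ofList params models dict(params); its items have
-- unique keys, so each dict comprehension '{k: v for k, v in params.items() if …}' is exactly a filter,
-- and 'sorted(d.items())' / truthiness of the bucket dicts act on those item lists.
def format_params_for_log_py (params : List (String × String)) : String :=
  let items := (PySem.Dict.ofList params).items
  let hw := items.filter (fun kv => pvHW.contains kv.1)
  let sw := items.filter (fun kv => pvSW.contains kv.1)
  let flow := items.filter (fun kv => pvFL.contains kv.1)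
  let other := items.filter
    (fun kv => !pvHW.contains kv.1 && !pvSW.contains kv.1 && !pvFL.contains kv.1)
  let parts : List String := []
  let parts := if hw ≠ [] then parts ++ [pvFmtSectionA "Hardware:" hw] else parts
  let parts := if sw ≠ [] then parts ++ [pvFmtSectionA "Software:" sw] else parts
  let parts := if flow ≠ [] then parts ++ [pvFmtSectionA "Synth/Flow:" flow] else parts
  let parts := if other ≠ [] then parts ++ [pvFmtSectionA "Other:" other] else parts
  let s := PySem.Str.join "\n" (parts.filter (fun p => p ≠ ""))
  if s = "" then "(empty)" else s

-- ===== PORT B =====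
-- B's _CATS / _TITLES tuples
def pvCats : List (List String) := [pvHW, pvSW, pvFL]
def pvTitles : List String := ["  Hardware:", "  Software:", "  Synth/Flow:", "  Other:"]

-- B's _cat: 'for i, s in enumerate(_CATS): if k in s: return i' / 'return 3'
def pvCatLoop (i : Int) (cs : List (List String)) (k : String) : Int :=
  match cs with
  | [] => 3
  | s :: rest => if s.contains k then i else pvCatLoop (i + 1) rest k

def pvCat (k : String) : Int := pvCatLoop 0 pvCats k

-- B's _wrap while-loop: how many further pairs extend the current line within 100 chars
def pvFit (width : Int) : List String → Nat
  | [] => 0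
  | p :: t => if width + 2 + PySem.Str.len p ≤ 100 then pvFit (width + 2 + PySem.Str.len p) t + 1 else 0

-- B's _wrap: emit one maximal line, recurse on the remaining pairs
def pvWrap : List String → List String
  | [] => []
  | p :: t =>
    ("    " ++ PySem.Str.join ", " (p :: t.take (pvFit (PySem.Str.len p) t)))
      :: pvWrap (t.drop (pvFit (PySem.Str.len p) t))
termination_by l => l.length
decreasing_by
  simp only [List.length_drop, List.length_cons]
  omega

-- B's _sections: peel one category run per call (the counting while-loop is the
-- takeWhile/dropWhile split of the rest at the first different category)
def pvSections : List (Int × String × String) → List String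
  | [] => []
  | t0 :: rest =>
    let c := t0.1
    let run := t0 :: rest.takeWhile (fun t => t.1 == c)
    PySem.List.pyGetD pvTitles c ""
      :: (pvWrap (run.map (fun t => t.2.1 ++ "=" ++ t.2.2))
          ++ pvSections (rest.dropWhile (fun t => t.1 == c)))
termination_by l => l.length
decreasing_by
  have := List.length_dropWhile_le (fun t => t.1 == t0.1) rest
  simp only [List.length_cons]
  omega

-- B's main: tag each dict item with its category, one global sort by (cat, key), flat emit
def format_params_for_log_py_alt (params : List (String × String)) : String :=
  let tagged := PySem.List.sorted2
    ((PySem.Dict.ofList params).items.map (fun kv => (pvCat kv.1, kv.1, kv.2)))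
    (fun t => t.1) (fun t => t.2.1)
  let s := PySem.Str.join "\n" (pvSections tagged)
  if s = "" then "(empty)" else s

-- ===== PRECONDITION & SPEC =====
def Spec_format_params_for_log_py (params : List (String × String)) (out : String) : Prop := out = format_params_for_log_py_alt params
instance (params : List (String × String)) (out : String) : Decidable (Spec_format_params_for_log_py params out) := by unfold Spec_format_params_for_log_py; infer_instance

-- ===== CLAIM (what is proved, stated in full; the proofs are below) =====
def Claim_equal_format_params_for_log_py : Prop := ∀ (params : List (String × String)), Dom_format_params_for_log_py params → Spec_format_params_for_log_py params (format_params_for_log_py params)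

-- ===== LEMMAS AND PROOFS =====

-- proof-side abbreviations
def pvTag (c : Int) (kv : String × String) : Int × String × String := (c, kv.1, kv.2)
def pvPair (kv : String × String) : String := kv.1 ++ "=" ++ kv.2
def pvW (buf : List String) : Int := (buf.map PySem.Str.len).sum + (buf.length : Int) * 2 - 2

-- ---- string join facts (proved on the PySem.Chars side) ----
theorem pv_cjoin_cons (sep x : List Char) (l : List (List Char)) (h : l ≠ []) :
    PySem.Chars.join sep (x :: l) = x ++ sep ++ PySem.Chars.join sep l := by
  cases l with
  | nil => exact absurd rfl h
  | cons y t => exact PySem.Chars.join_cons_cons sep x y t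

theorem pv_cjoin_append (sep : List Char) (l1 l2 : List (List Char)) (h1 : l1 ≠ []) (h2 : l2 ≠ []) :
    PySem.Chars.join sep (l1 ++ l2) = PySem.Chars.join sep l1 ++ sep ++ PySem.Chars.join sep l2 := by
  induction l1 with
  | nil => exact absurd rfl h1
  | cons x t ih =>
    cases t with
    | nil => simpa [PySem.Chars.join_singleton] using pv_cjoin_cons sep x l2 h2
    | cons y t2 =>
      rw [List.cons_append, pv_cjoin_cons sep x ((y :: t2) ++ l2) (by simp),
        ih (by simp), pv_cjoin_cons sep x (y :: t2) (by simp)]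
      simp

theorem pv_join_nil (sep : String) : PySem.Str.join sep [] = "" := by
  apply String.toList_inj.mp
  simp [PySem.Str.toList_join, PySem.Chars.join_nil]

theorem pv_join_singleton (sep x : String) : PySem.Str.join sep [x] = x := by
  apply String.toList_inj.mp
  simp [PySem.Str.toList_join, PySem.Chars.join_singleton]

theorem pv_join_cons (sep x : String) (l : List String) (h : l ≠ []) :
    PySem.Str.join sep (x :: l) = x ++ sep ++ PySem.Str.join sep l := by
  apply String.toList_inj.mp
  rw [PySem.Str.toList_join, List.map_cons, pv_cjoin_cons _ _ _ (by simpa using h)]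
  simp [PySem.Str.toList_join, String.toList_append]

theorem pv_join_append (sep : String) (l1 l2 : List String) (h1 : l1 ≠ []) (h2 : l2 ≠ []) :
    PySem.Str.join sep (l1 ++ l2) = PySem.Str.join sep l1 ++ sep ++ PySem.Str.join sep l2 := by
  apply String.toList_inj.mp
  rw [PySem.Str.toList_join, List.map_append,
    pv_cjoin_append _ _ _ (by simpa using h1) (by simpa using h2)]
  simp [PySem.Str.toList_join, String.toList_append]

-- ---- B's wrap = A's buffer fold ----
theorem pvW_append_singleton (buf : List String) (p : String) :
    pvW (buf ++ [p]) = pvW buf + 2 + PySem.Str.len p := by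
  simp [pvW]
  ring

theorem pvW_singleton (p : String) : pvW [p] = PySem.Str.len p := by
  simp [pvW]

theorem pv_sum_eq (buf : List String) :
    (buf.map PySem.Str.len).sum + (buf.length : Int) * 2 = pvW buf + 2 := by
  simp [pvW]

theorem pv_fit_accum (t : List String) : ∀ (lines buf : List String), buf ≠ [] →
    t.foldl pvStepA (lines, buf)
      = (t.drop (pvFit (pvW buf) t)).foldl pvStepA
          (lines, buf ++ t.take (pvFit (pvW buf) t)) := by
  induction t with
  | nil => intro lines buf _; simp [pvFit]
  | cons p t' ih =>
    intro lines buf hbuf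
    by_cases hc : pvW buf + 2 + PySem.Str.len p ≤ 100
    · rw [show pvFit (pvW buf) (p :: t') = pvFit (pvW buf + 2 + PySem.Str.len p) t' + 1 from by
        rw [pvFit]; rw [if_pos hc]]
      have hstep : pvStepA (lines, buf) p = (lines, buf ++ [p]) := by
        unfold pvStepA
        rw [if_neg]
        rintro ⟨-, hgt⟩
        dsimp only at hgt
        rw [pv_sum_eq] at hgt
        omega
      rw [List.foldl_cons, hstep, List.take_succ_cons, List.drop_succ_cons,
        ih lines (buf ++ [p]) (by simp), pvW_append_singleton]
      simp [List.append_assoc]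
    · rw [show pvFit (pvW buf) (p :: t') = 0 from by rw [pvFit]; rw [if_neg hc]]
      simp

theorem pv_fit_stop (t : List String) : ∀ (buf : List String), buf ≠ [] →
    ∀ (q : String) (r : List String), t.drop (pvFit (pvW buf) t) = q :: r →
    pvW (buf ++ t.take (pvFit (pvW buf) t)) + 2 + PySem.Str.len q > 100 := by
  induction t with
  | nil => intro buf _ q r h; simp [pvFit] at h
  | cons p t' ih =>
    intro buf hbuf q r h
    by_cases hc : pvW buf + 2 + PySem.Str.len p ≤ 100
    · rw [show pvFit (pvW buf) (p :: t') = pvFit (pvW buf + 2 + PySem.Str.len p) t' + 1 from by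
        rw [pvFit]; rw [if_pos hc]] at h ⊢
      rw [List.drop_succ_cons] at h
      rw [List.take_succ_cons, show buf ++ p :: t'.take (pvFit (pvW buf + 2 + PySem.Str.len p) t')
        = (buf ++ [p]) ++ t'.take (pvFit (pvW buf + 2 + PySem.Str.len p) t') from by simp]
      have := ih (buf ++ [p]) (by simp) q r (by rw [pvW_append_singleton]; exact h)
      rw [pvW_append_singleton] at this
      exact this
    · rw [show pvFit (pvW buf) (p :: t') = 0 from by rw [pvFit]; rw [if_neg hc]] at h ⊢
      rw [List.drop_zero] at h
      injection h with h1 h2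
      subst h1
      rw [List.take_zero, List.append_nil]
      omega

theorem pv_wrap_nil : pvWrap [] = [] := by
  rw [pvWrap]

theorem pv_wrap_ne_nil (p : String) (t : List String) : pvWrap (p :: t) ≠ [] := by
  rw [pvWrap]
  simp

theorem pv_wrap_fold (n : Nat) : ∀ (t : List String), t.length ≤ n → ∀ (p : String) (lines : List String),
    (if (t.foldl pvStepA (lines, [p])).2 ≠ [] then
        (t.foldl pvStepA (lines, [p])).1 ++ ["    " ++ PySem.Str.join ", " (t.foldl pvStepA (lines, [p])).2]
      else (t.foldl pvStepA (lines, [p])).1)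
      = lines ++ pvWrap (p :: t) := by
  induction n with
  | zero =>
    intro t ht p lines
    cases t with
    | cons a b => simp at ht
    | nil =>
      rw [pvWrap]
      simp [pvFit, pv_wrap_nil]
  | succ n ih =>
    intro t ht p lines
    have hacc := pv_fit_accum t lines [p] (by simp)
    rw [pvW_singleton] at hacc
    rw [pvWrap]
    cases hdrop : t.drop (pvFit (PySem.Str.len p) t) with
    | nil =>
      rw [hdrop] at hacc
      rw [hacc]
      simp only [List.foldl_nil, List.singleton_append]
      rw [if_pos (by simp), pv_wrap_nil]
    | cons q r =>
      have hstop := pv_fit_stop t [p] (by simp) q r (by rw [pvW_singleton]; exact hdrop)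
      rw [pvW_singleton] at hstop
      have hstep : pvStepA (lines, p :: t.take (pvFit (PySem.Str.len p) t)) q
          = (lines ++ ["    " ++ PySem.Str.join ", " (p :: t.take (pvFit (PySem.Str.len p) t))], [q]) := by
        unfold pvStepA
        rw [if_pos]
        constructor
        · simp
        · rw [show ((p :: t.take (pvFit (PySem.Str.len p) t)).map PySem.Str.len).sum
              + ((p :: t.take (pvFit (PySem.Str.len p) t)).length : Int) * 2
            = pvW (p :: t.take (pvFit (PySem.Str.len p) t)) + 2 from pv_sum_eq _]
          simpa using hstop
      have hr : r.length ≤ n := by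
        have h1 : (t.drop (pvFit (PySem.Str.len p) t)).length ≤ t.length := by
          simp [List.length_drop]
        rw [hdrop] at h1
        simp at h1
        omega
      have hih := ih r hr q (lines ++ ["    " ++ PySem.Str.join ", " (p :: t.take (pvFit (PySem.Str.len p) t))])
      rw [hdrop] at hacc
      rw [hacc]
      simp only [List.singleton_append, List.foldl_cons, hstep]
      rw [hih]
      simp

-- ---- A's section in flat-lines form ----
theorem pv_sectionA_eq (title : String) (S : List (String × String)) (hS : S ≠ []) :
    pvFmtSectionA title S
      = PySem.Str.join "\n"
          (("  " ++ title) :: pvWrap ((PySem.List.sorted2 S Prod.fst Prod.snd).map pvPair)) := by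
  unfold pvFmtSectionA
  rw [if_neg hS]
  have hsne : PySem.List.sorted2 S Prod.fst Prod.snd ≠ [] := by
    intro hc
    exact hS ((hc ▸ (PySem.List.sorted2_perm S Prod.fst Prod.snd false)).symm.eq_nil)
  cases hq : PySem.List.sorted2 S Prod.fst Prod.snd with
  | nil => exact absurd hq hsne
  | cons q qs =>
    dsimp only
    have hfirst : pvStepA ([], []) (q.1 ++ "=" ++ q.2) = ([], [q.1 ++ "=" ++ q.2]) := by
      unfold pvStepA
      rw [if_neg (by rintro ⟨hne, -⟩; exact hne rfl)]
      rfl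
    rw [List.map_cons, List.foldl_cons, hfirst,
      pv_wrap_fold (qs.map (fun kv => kv.1 ++ "=" ++ kv.2)).length _ le_rfl]
    rw [List.nil_append, List.map_cons,
      pv_join_cons "\n" ("  " ++ title) _ (pv_wrap_ne_nil _ _)]
    rfl

-- ---- B's sections over tagged blocks ----
theorem pv_run_split (c : Int) : ∀ (l r : List (Int × String × String)), (∀ u ∈ l, u.1 = c) →
    (l ++ r).takeWhile (fun t => t.1 == c) = l ++ r.takeWhile (fun t => t.1 == c)
    ∧ (l ++ r).dropWhile (fun t => t.1 == c) = r.dropWhile (fun t => t.1 == c) := by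
  intro l
  induction l with
  | nil => intro r _; simp
  | cons u l' ih =>
    intro r hl
    have hu : (u.1 == c) = true := by
      simp [hl u (by simp)]
    have := ih r (fun v hv => hl v (by simp [hv]))
    rw [List.cons_append]
    simp only [List.takeWhile_cons, List.dropWhile_cons, hu, if_true]
    exact ⟨by rw [this.1, List.cons_append], by rw [this.2]⟩

theorem pv_rest_split (c : Int) (rest : List (Int × String × String))
    (hrest : ∀ u ∈ rest, u.1 ≠ c) :
    rest.takeWhile (fun t => t.1 == c) = [] ∧ rest.dropWhile (fun t => t.1 == c) = rest := by
  cases rest with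
  | nil => simp
  | cons u r =>
    have hu : (u.1 == c) = false := by
      simp [hrest u (by simp)]
    simp only [List.takeWhile_cons, List.dropWhile_cons, hu]
    exact ⟨rfl, rfl⟩

theorem pv_sections_nil : pvSections [] = [] := by
  rw [pvSections]

theorem pv_sections_block (c : Int) (S : List (String × String)) (hS : S ≠ [])
    (rest : List (Int × String × String)) (hrest : ∀ u ∈ rest, u.1 ≠ c) :
    pvSections (S.map (pvTag c) ++ rest)
      = PySem.List.pyGetD pvTitles c ""
          :: (pvWrap (S.map pvPair) ++ pvSections rest) := by
  cases S with
  | nil => exact absurd rfl hS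
  | cons kv S' =>
    rw [show (kv :: S').map (pvTag c) ++ rest = pvTag c kv :: (S'.map (pvTag c) ++ rest) from by simp]
    rw [pvSections]
    have h1 := pv_run_split c (S'.map (pvTag c)) rest (by
      intro u hu
      rcases List.mem_map.mp hu with ⟨kv', -, rfl⟩
      rfl)
    have h2 := pv_rest_split c rest hrest
    rw [show (pvTag c kv).1 = c from rfl, h1.1, h2.1, h1.2, h2.2, List.append_nil]
    congr 2
    rw [show pvTag c kv :: S'.map (pvTag c) = (kv :: S').map (pvTag c) from rfl,
      List.map_map]
    rfl

theorem pv_sections_flat : ∀ (L : List (Int × List (String × String))),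
    L.Pairwise (fun a b => a.1 ≠ b.1) →
    pvSections (L.flatMap (fun cs => cs.2.map (pvTag cs.1)))
      = L.flatMap (fun cs => if cs.2 = [] then []
          else PySem.List.pyGetD pvTitles cs.1 "" :: pvWrap (cs.2.map pvPair)) := by
  intro L
  induction L with
  | nil => intro _; simp [pv_sections_nil]
  | cons b L' ih =>
    intro hpw
    rw [List.pairwise_cons] at hpw
    by_cases hb : b.2 = []
    · rw [List.flatMap_cons, List.flatMap_cons, hb]
      rw [if_pos rfl]
      simp only [List.map_nil, List.nil_append]
      exact ih hpw.2
    · rw [List.flatMap_cons, List.flatMap_cons, if_neg hb,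
        pv_sections_block b.1 b.2 hb _ (by
          intro u hu
          rcases List.mem_flatMap.mp hu with ⟨b', hb', hu'⟩
          rcases List.mem_map.mp hu' with ⟨kv, -, rfl⟩
          exact fun hc => (hpw.1 b' hb') hc.symm),
        ih hpw.2, List.cons_append]

-- ---- sorted2 = sorted with a lexicographic key ----
theorem pv_sorted2_eq_gen {α κ₁ κ₂ : Type} [LinearOrder κ₁] [LinearOrder κ₂]
    (xs : List α) (k1 : α → κ₁) (k2 : α → κ₂) :
    PySem.List.sorted2 xs k1 k2 = PySem.List.sorted xs (fun a => toLex (k1 a, k2 a)) := by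
  rw [PySem.List.sorted_eq_foldl_insertBy]
  simp only [PySem.List.sorted2, Bool.false_eq_true, if_false]
  have hbe : (fun a b => decide (k1 a < k1 b) || (!decide (k1 b < k1 a) && decide (k2 a < k2 b)))
      = (fun a b => decide ((toLex (k1 a, k2 a) : Lex (κ₁ × κ₂)) < toLex (k1 b, k2 b))) := by
    funext a b
    rcases lt_trichotomy (k1 a) (k1 b) with h | h | h
    · simp [Prod.Lex.lt_iff, h, lt_asymm h]
    · simp [Prod.Lex.lt_iff, h]
    · simp [Prod.Lex.lt_iff, h, lt_asymm h, ne_of_gt h]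
  rw [hbe]

theorem pv_sorted2_fst_lt (S : List (String × String)) (hnd : (S.map Prod.fst).Nodup) :
    (PySem.List.sorted2 S Prod.fst Prod.snd).Pairwise (fun a b => a.1 < b.1) := by
  rw [pv_sorted2_eq_gen]
  have h1 := PySem.List.sorted_pairwise S (fun kv => (toLex (kv.1, kv.2) : Lex (String × String)))
  have hperm := PySem.List.sorted_perm S (fun kv => (toLex (kv.1, kv.2) : Lex (String × String))) false
  have hnd2 : ((PySem.List.sorted S (fun kv => (toLex (kv.1, kv.2) : Lex (String × String)))).map Prod.fst).Nodup :=
    ((hperm.map Prod.fst).nodup_iff).mpr hnd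
  have hne : (PySem.List.sorted S (fun kv => (toLex (kv.1, kv.2) : Lex (String × String)))).Pairwise
      (fun a b => a.1 ≠ b.1) := by
    exact List.pairwise_map.mp hnd2
  refine (h1.and hne).imp ?_
  rintro a b ⟨hle, hne'⟩
  rcases Prod.Lex.le_iff.mp hle with h | ⟨h, -⟩
  · exact h
  · exact absurd h hne'

-- ---- category bridge and disjointness of the literal key sets ----
theorem pv_cat_eq (k : String) :
    pvCat k = if pvHW.contains k then 0 else if pvSW.contains k then 1
      else if pvFL.contains k then 2 else 3 := by
  simp [pvCat, pvCats, pvCatLoop]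

theorem pv_disj_SW (k : String) (h : pvSW.contains k = true) : pvHW.contains k = false := by
  simp only [pvSW, List.contains_eq_mem, decide_eq_true_eq, List.mem_cons,
    List.not_mem_nil, or_false] at h
  rcases h with rfl | rfl | rfl | rfl | rfl | rfl | rfl | rfl <;> decide

theorem pv_disj_FL (k : String) (h : pvFL.contains k = true) :
    pvHW.contains k = false ∧ pvSW.contains k = false := by
  simp only [pvFL, List.contains_eq_mem, decide_eq_true_eq, List.mem_cons,
    List.not_mem_nil, or_false] at h
  rcases h with rfl | rfl | rfl | rfl | rfl | rfl | rfl | rfl | rfl | rfl | rfl | rfl | rfl |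
    rfl | rfl | rfl | rfl <;> exact ⟨by decide, by decide⟩

-- ===== VERDICT (by name: the statement is the Claim_ definition above) =====
theorem pv_wrap_map_ne (b : List (String × String)) (hb : b ≠ []) :
    pvWrap ((PySem.List.sorted2 b Prod.fst Prod.snd).map pvPair) ≠ [] := by
  cases hq : PySem.List.sorted2 b Prod.fst Prod.snd with
  | nil =>
    exact absurd ((hq ▸ (PySem.List.sorted2_perm b Prod.fst Prod.snd false)).symm.eq_nil) hb
  | cons q qs =>
    rw [List.map_cons]
    exact pv_wrap_ne_nil _ _

set_option maxHeartbeats 3200000 in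
theorem format_params_for_log_py_spec : Claim_equal_format_params_for_log_py := by
  intro params _
  unfold Spec_format_params_for_log_py format_params_for_log_py format_params_for_log_py_alt
  dsimp only
  set items := (PySem.Dict.ofList params).items with hitems
  set hw := items.filter (fun kv => pvHW.contains kv.1) with hhw
  set sw := items.filter (fun kv => pvSW.contains kv.1) with hsw
  set fl := items.filter (fun kv => pvFL.contains kv.1) with hfl
  set ot := items.filter (fun kv => !pvHW.contains kv.1 && !pvSW.contains kv.1 && !pvFL.contains kv.1) with hot
  -- unique keys
  have hknd : (items.map Prod.fst).Nodup := by
    have h := PySem.Dict.nodup_keys_ofList (ν := String) params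
    simp only [PySem.Dict.keys] at h
    exact h
  -- category of each bucket member
  have hcat0 : ∀ kv ∈ hw, pvCat kv.1 = 0 := by
    intro kv hkv
    have h := (List.mem_filter.mp hkv).2
    rw [pv_cat_eq, if_pos h]
  have hcat1 : ∀ kv ∈ sw, pvCat kv.1 = 1 := by
    intro kv hkv
    have h := (List.mem_filter.mp hkv).2
    rw [pv_cat_eq, if_neg (by rw [pv_disj_SW _ h]; simp), if_pos h]
  have hcat2 : ∀ kv ∈ fl, pvCat kv.1 = 2 := by
    intro kv hkv
    have h := (List.mem_filter.mp hkv).2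
    obtain ⟨ha, hb⟩ := pv_disj_FL _ h
    rw [pv_cat_eq, if_neg (by rw [ha]; simp), if_neg (by rw [hb]; simp), if_pos h]
  have hcat3 : ∀ kv ∈ ot, pvCat kv.1 = 3 := by
    intro kv hkv
    have h := (List.mem_filter.mp hkv).2
    simp only [Bool.and_eq_true, Bool.not_eq_true'] at h
    rw [pv_cat_eq, if_neg (by rw [h.1.1]; simp), if_neg (by rw [h.1.2]; simp),
      if_neg (by rw [h.2]; simp)]
  -- the four buckets partition the items
  have p0 := List.filter_append_perm (fun kv => pvHW.contains kv.1) items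
  have p1 := List.filter_append_perm (fun kv => pvSW.contains kv.1)
      (items.filter (fun kv => !pvHW.contains kv.1))
  have p2 := List.filter_append_perm (fun kv => pvFL.contains kv.1)
      ((items.filter (fun kv => !pvHW.contains kv.1)).filter (fun kv => !pvSW.contains kv.1))
  have e1 : (items.filter (fun kv => !pvHW.contains kv.1)).filter (fun kv => pvSW.contains kv.1) = sw := by
    rw [List.filter_filter, hsw]
    apply List.filter_congr
    intro kv _
    cases h : pvSW.contains kv.1
    · rw [Bool.false_and]
    · rw [pv_disj_SW _ h, Bool.not_false, Bool.and_true]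
  have e2 : ((items.filter (fun kv => !pvHW.contains kv.1)).filter (fun kv => !pvSW.contains kv.1)).filter
      (fun kv => pvFL.contains kv.1) = fl := by
    rw [List.filter_filter, List.filter_filter, hfl]
    apply List.filter_congr
    intro kv _
    cases h : pvFL.contains kv.1
    · rw [Bool.false_and, Bool.false_and]
    · obtain ⟨ha, hb⟩ := pv_disj_FL _ h
      rw [ha, hb, Bool.not_false, Bool.and_true, Bool.and_true]
  have e3 : ((items.filter (fun kv => !pvHW.contains kv.1)).filter (fun kv => !pvSW.contains kv.1)).filter
      (fun kv => !pvFL.contains kv.1) = ot := by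
    rw [List.filter_filter, List.filter_filter, hot]
    apply List.filter_congr
    intro kv _
    cases hA : pvHW.contains kv.1 <;> cases hB : pvSW.contains kv.1 <;>
      cases hC : pvFL.contains kv.1 <;> rfl
  have q2 : (fl ++ ot).Perm
      ((items.filter (fun kv => !pvHW.contains kv.1)).filter (fun kv => !pvSW.contains kv.1)) := by
    rw [← e2, ← e3]
    exact p2
  have q1 : (sw ++ (fl ++ ot)).Perm (items.filter (fun kv => !pvHW.contains kv.1)) := by
    rw [e1] at p1
    exact (List.Perm.append_left sw q2).trans p1
  have q0 : (hw ++ (sw ++ (fl ++ ot))).Perm items := by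
    rw [← hhw] at p0
    exact (List.Perm.append_left hw q1).trans p0
  -- the globally sorted tagged list is the four sorted buckets in category order
  have hT : PySem.List.sorted2 (items.map (fun kv => (pvCat kv.1, kv.1, kv.2)))
        (fun t => t.1) (fun t => t.2.1)
      = (PySem.List.sorted2 hw Prod.fst Prod.snd).map (pvTag 0)
        ++ ((PySem.List.sorted2 sw Prod.fst Prod.snd).map (pvTag 1)
        ++ ((PySem.List.sorted2 fl Prod.fst Prod.snd).map (pvTag 2)
        ++ (PySem.List.sorted2 ot Prod.fst Prod.snd).map (pvTag 3))) := by
    rw [pv_sorted2_eq_gen]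
    apply PySem.List.sorted_eq_of_perm_of_pairwise_lt
    · have m : ∀ (c : Int) (b : List (String × String)), (∀ kv ∈ b, pvCat kv.1 = c) →
          ((PySem.List.sorted2 b Prod.fst Prod.snd).map (pvTag c)).Perm
            (b.map (fun kv => (pvCat kv.1, kv.1, kv.2))) := by
        intro c b hc
        have hmeq : b.map (pvTag c) = b.map (fun kv => (pvCat kv.1, kv.1, kv.2)) :=
          List.map_congr_left (fun kv hkv => by simp [pvTag, hc kv hkv])
        exact hmeq ▸ ((PySem.List.sorted2_perm b Prod.fst Prod.snd false).map (pvTag c))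
      refine (((m 0 hw hcat0).append ((m 1 sw hcat1).append
        ((m 2 fl hcat2).append (m 3 ot hcat3)))).trans ?_)
      rw [← List.map_append, ← List.map_append, ← List.map_append]
      exact q0.map _
    · have hsub : ∀ (p : (String × String) → Bool), ((items.filter p).map Prod.fst).Nodup :=
        fun p => ((List.filter_sublist).map Prod.fst).nodup hknd
      have hpair : ∀ (c : Int) (b : List (String × String)), ((b.map Prod.fst).Nodup) →
          ((PySem.List.sorted2 b Prod.fst Prod.snd).map (pvTag c)).Pairwise
            (fun a b' => (toLex (a.1, a.2.1) : Lex (Int × String)) < toLex (b'.1, b'.2.1)) := by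
        intro c b hnd
        refine List.pairwise_map.mpr ((pv_sorted2_fst_lt b hnd).imp ?_)
        intro a b' hab
        simp [pvTag, Prod.Lex.lt_iff, hab]
      have hcross : ∀ (c c' : Int), c < c' → ∀ (b b' : List (String × String)),
          ∀ x ∈ (PySem.List.sorted2 b Prod.fst Prod.snd).map (pvTag c),
          ∀ y ∈ (PySem.List.sorted2 b' Prod.fst Prod.snd).map (pvTag c'),
          (toLex (x.1, x.2.1) : Lex (Int × String)) < toLex (y.1, y.2.1) := by
        intro c c' hcc b b' x hx y hy
        rcases List.mem_map.mp hx with ⟨kv, -, rfl⟩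
        rcases List.mem_map.mp hy with ⟨kv', -, rfl⟩
        simp [pvTag, Prod.Lex.lt_iff, hcc]
      rw [List.pairwise_append, List.pairwise_append, List.pairwise_append]
      refine ⟨hpair 0 hw (hsub _), ⟨hpair 1 sw (hsub _),
        ⟨hpair 2 fl (hsub _), hpair 3 ot (hsub _), ?_⟩, ?_⟩, ?_⟩
      · exact hcross 2 3 (by norm_num) fl ot
      · intro x hx y hy
        rcases List.mem_append.mp hy with hy | hy
        · exact hcross 1 2 (by norm_num) sw fl x hx y hy
        · exact hcross 1 3 (by norm_num) sw ot x hx y hy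
      · intro x hx y hy
        rcases List.mem_append.mp hy with hy | hy
        · exact hcross 0 1 (by norm_num) hw sw x hx y hy
        · rcases List.mem_append.mp hy with hy | hy
          · exact hcross 0 2 (by norm_num) hw fl x hx y hy
          · exact hcross 0 3 (by norm_num) hw ot x hx y hy
  -- B's sections over the four blocks
  have hpw4 : ([((0 : Int), PySem.List.sorted2 hw Prod.fst Prod.snd),
      (1, PySem.List.sorted2 sw Prod.fst Prod.snd),
      (2, PySem.List.sorted2 fl Prod.fst Prod.snd),
      (3, PySem.List.sorted2 ot Prod.fst Prod.snd)]).Pairwise (fun a b => a.1 ≠ b.1) := by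
    norm_num [List.pairwise_cons]
  have hsecs := pv_sections_flat _ hpw4
  simp only [List.flatMap_cons, List.flatMap_nil, List.append_nil] at hsecs
  have hnil : ∀ (b : List (String × String)),
      (PySem.List.sorted2 b Prod.fst Prod.snd = []) ↔ b = [] := by
    intro b
    constructor
    · intro hc
      exact ((hc ▸ (PySem.List.sorted2_perm b Prod.fst Prod.snd false)).symm.eq_nil)
    · intro hb
      rw [hb]
      rfl
  have hA : ∀ (title : String) (c : Int) (b : List (String × String)), b ≠ [] →
      ("  " ++ title) = PySem.List.pyGetD pvTitles c "" →
      pvFmtSectionA title b = PySem.Str.join "\n"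
        (PySem.List.pyGetD pvTitles c ""
          :: pvWrap ((PySem.List.sorted2 b Prod.fst Prod.snd).map pvPair)) := by
    intro title c b hb htit
    rw [pv_sectionA_eq title b hb, htit]
  have hA0 := fun h => hA "Hardware:" 0 hw h (by decide)
  have hA1 := fun h => hA "Software:" 1 sw h (by decide)
  have hA2 := fun h => hA "Synth/Flow:" 2 fl h (by decide)
  have hA3 := fun h => hA "Other:" 3 ot h (by decide)
  rw [hT, hsecs]
  simp only [hnil hw, hnil sw, hnil fl, hnil ot]
  by_cases h0 : hw = [] <;> by_cases h1 : sw = [] <;> by_cases h2 : fl = [] <;> by_cases h3 : ot = []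
  all_goals (
    simp [h0, h1, h2, h3, hA0, hA1, hA2, hA3, pv_join_nil, pv_join_cons,
      pv_join_singleton, pv_join_append, pv_wrap_map_ne, String.append_assoc])
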